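-- pv_equiv track=rewrite | github.com/matt-yag/advent-code-2023 | 14-template/02-solution.py | new_text
-- ===== SOURCE A (Python) =====
-- def new_text(text):
--     counter_o = 0
--     counter_dot = 0
--     result = ''
--     for c in text:
--         if c == '.':
--             counter_dot += 1
--         elif c == 'O':
--             counter_o += 1
--         elif c == '#':
--             result += ('O' * counter_o) + ('.' * counter_dot) + '#'
--             counter_o = 0
--             counter_dot = 0
--     result += ('O' * counter_o) + ('.' * counter_dot)
--     return result
-- ===== SOURCE B (Python) =====
-- def new_text(text):
--     return '#'.join('O' * seg.count('O') + '.' * seg.count('.')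
--                     for seg in text.split('#'))
-- ===== Notes on version B (the rewrite author's own statement) =====
-- stated objective: idiomatic
-- what changed: Replaced A's single stateful scan with two counters and an explicit flush at each separator by a split on the separator / per-segment count / join decomposition.
import Mathlib
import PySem

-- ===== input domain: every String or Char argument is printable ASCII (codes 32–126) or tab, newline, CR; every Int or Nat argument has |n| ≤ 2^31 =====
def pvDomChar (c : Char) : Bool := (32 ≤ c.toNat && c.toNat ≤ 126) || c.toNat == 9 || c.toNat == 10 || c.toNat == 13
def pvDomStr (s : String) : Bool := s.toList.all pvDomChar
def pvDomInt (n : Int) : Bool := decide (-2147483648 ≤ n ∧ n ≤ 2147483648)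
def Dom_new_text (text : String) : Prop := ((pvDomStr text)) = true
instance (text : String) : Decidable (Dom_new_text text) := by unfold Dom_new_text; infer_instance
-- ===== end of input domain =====

-- B replaces A's stateful counter-and-flush scan by an idiomatic split('#') / count / join decomposition; return values proved equal on all inputs.

-- ===== PORT A =====
-- the loop's state is (counter_o, counter_dot, result)
def new_text (text : String) : String :=
  let st := text.toList.foldl
    (fun (st : Nat × Nat × List Char) c =>
      if c = '.' then (st.1, st.2.1 + 1, st.2.2)
      else if c = 'O' then (st.1 + 1, st.2.1, st.2.2)
      else if c = '#' then
        (0, 0, st.2.2 ++ List.replicate st.1 'O' ++ List.replicate st.2.1 '.' ++ ['#'])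
      else st)
    (0, 0, [])
  String.ofList (st.2.2 ++ List.replicate st.1 'O' ++ List.replicate st.2.1 '.')

-- ===== PORT B =====
-- 'O' * seg.count('O') + '.' * seg.count('.')
def rebuiltSeg (seg : List Char) : List Char :=
  List.replicate (PySem.Chars.count seg ['O']) 'O' ++ List.replicate (PySem.Chars.count seg ['.']) '.'

def new_text_alt (text : String) : String :=
  String.ofList (PySem.Chars.join ['#'] ((PySem.Chars.splitOn text.toList ['#']).map rebuiltSeg))

-- ===== PRECONDITION & SPEC =====
def Spec_new_text (text : String) (out : String) : Prop := out = new_text_alt text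
instance (text : String) (out : String) : Decidable (Spec_new_text text out) := by unfold Spec_new_text; infer_instance

-- ===== CLAIM (what is proved, stated in full; the proofs are below) =====
def Claim_equal_new_text : Prop := ∀ (text : String), Dom_new_text text → Spec_new_text text (new_text text)

-- ===== LEMMAS AND PROOFS =====

-- A's loop as a structural recursion on the remaining text (proof-only helper)
def Aflush (cs : List Char) (co cd : Nat) : List Char :=
  match cs with
  | [] => List.replicate co 'O' ++ List.replicate cd '.'
  | c :: rest =>
    if c = '.' then Aflush rest co (cd + 1)
    else if c = 'O' then Aflush rest (co + 1) cd
    else if c = '#' then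
      List.replicate co 'O' ++ List.replicate cd '.' ++ '#' :: Aflush rest 0 0
    else Aflush rest co cd

-- cons-form of PySem.Chars.splitOn on a single-char separator (proof-only helper)
def mySplit (cs : List Char) : List (List Char) :=
  match cs with
  | [] => [[]]
  | c :: rest => if c = '#' then [] :: mySplit rest else (mySplit rest).modifyHead (c :: ·)

lemma mySplit_ne_nil : ∀ cs : List Char, mySplit cs ≠ []
  | [] => by simp [mySplit]
  | c :: rest => by
    simp only [mySplit]
    split
    · simp
    · have hne := mySplit_ne_nil rest
      cases h : mySplit rest with
      | nil => exact absurd h hne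
      | cons a l => simp [List.modifyHead]

lemma modifyHead_fun_id {α : Type} (l : List α) : List.modifyHead (fun x => x) l = l := by
  cases l <;> simp [List.modifyHead]

lemma splitOn_go_spec (fuel : Nat) (l cur : List Char) (acc : List (List Char))
    (h : l.length < fuel) :
    PySem.Chars.splitOn.go ['#'] fuel l cur acc
      = acc.reverse ++ (mySplit l).modifyHead (cur.reverse ++ ·) := by
  induction fuel generalizing l cur acc with
  | zero => omega
  | succ fuel ih =>
    cases l with
    | nil => simp [PySem.Chars.splitOn.go, mySplit]
    | cons c rest =>
      by_cases hc : c = '#'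
      · subst hc
        simp only [PySem.Chars.splitOn.go, List.isPrefixOf, beq_self_eq_true, Bool.true_and,
          if_true, List.length_cons, List.length_nil,
          List.drop_succ_cons, List.drop_zero]
        rw [ih rest [] (cur.reverse :: acc) (by simpa using Nat.lt_of_succ_lt_succ h)]
        simp [mySplit, modifyHead_fun_id]
      · have hc' : ¬ ('#' = c) := fun h' => hc h'.symm
        have hpre : (['#'].isPrefixOf (c :: rest)) = false := by
          simp [List.isPrefixOf, hc']
        simp only [PySem.Chars.splitOn.go, hpre, Bool.false_eq_true, if_false]
        rw [ih rest (c :: cur) acc (by simpa using Nat.lt_of_succ_lt_succ h)]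
        simp only [mySplit, hc, if_false]
        congr 1
        obtain ⟨a, l', hl⟩ : ∃ a l', mySplit rest = a :: l' := by
          cases hms : mySplit rest with
          | nil => exact absurd hms (mySplit_ne_nil rest)
          | cons a l' => exact ⟨a, l', rfl⟩
        simp [hl, List.modifyHead]

lemma splitOn_eq_mySplit (cs : List Char) :
    PySem.Chars.splitOn cs ['#'] = mySplit cs := by
  have hgo := splitOn_go_spec (cs.length + 1) cs [] [] (by omega)
  simpa [PySem.Chars.splitOn, modifyHead_fun_id] using hgo

lemma count_go_single (c : Char) (fuel : Nat) (l : List Char) (acc : Nat)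
    (h : l.length ≤ fuel) :
    PySem.Chars.count.go [c] fuel l acc = acc + l.count c := by
  induction fuel generalizing l acc with
  | zero =>
    have : l = [] := List.eq_nil_of_length_eq_zero (Nat.le_zero.mp h)
    simp [this, PySem.Chars.count.go]
  | succ fuel ih =>
    cases l with
    | nil => simp [PySem.Chars.count.go]
    | cons a rest =>
      by_cases ha : c = a
      · subst ha
        simp only [PySem.Chars.count.go, List.isPrefixOf, beq_self_eq_true, Bool.true_and,
          if_true, List.length_cons, List.length_nil,
          List.drop_succ_cons, List.drop_zero]
        rw [ih rest (acc + 1) (by simpa using Nat.le_of_succ_le_succ h)]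
        simp [List.count_cons]
        omega
      · have hpre : (([c] : List Char).isPrefixOf (a :: rest)) = false := by
          simp [List.isPrefixOf, ha]
        simp only [PySem.Chars.count.go, hpre, Bool.false_eq_true, if_false]
        rw [ih rest acc (by simpa using Nat.le_of_succ_le_succ h)]
        simp [List.count_cons]
        exact fun h' => ha h'.symm

lemma count_single (c : Char) (l : List Char) :
    PySem.Chars.count l [c] = l.count c := by
  simp [PySem.Chars.count, count_go_single c l.length l 0 (le_refl _)]

-- A's loop body as a named function (proof-only; definitionally the lambda in new_text)
def fstep : Nat × Nat × List Char → Char → Nat × Nat × List Char := fun st c =>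
  if c = '.' then (st.1, st.2.1 + 1, st.2.2)
  else if c = 'O' then (st.1 + 1, st.2.1, st.2.2)
  else if c = '#' then
    (0, 0, st.2.2 ++ List.replicate st.1 'O' ++ List.replicate st.2.1 '.' ++ ['#'])
  else st

-- A's fold produces exactly Aflush
lemma foldA_spec (cs : List Char) (co cd : Nat) (res : List Char) :
    (cs.foldl fstep (co, cd, res)).2.2
      ++ List.replicate (cs.foldl fstep (co, cd, res)).1 'O'
      ++ List.replicate (cs.foldl fstep (co, cd, res)).2.1 '.'
      = res ++ Aflush cs co cd := by
  induction cs generalizing co cd res with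
  | nil => simp [Aflush]
  | cons c rest ih =>
    by_cases h1 : c = '.'
    · simp [h1, List.foldl_cons, Aflush, fstep, ih]
    · by_cases h2 : c = 'O'
      · simp [h1, h2, List.foldl_cons, Aflush, fstep, ih]
      · by_cases h3 : c = '#'
        · simp [h1, h2, h3, List.foldl_cons, Aflush, fstep, ih]
        · simp [h1, h2, h3, List.foldl_cons, Aflush, fstep, ih]

-- head/tail view of mySplit
lemma mySplit_view (cs : List Char) :
    mySplit cs = cs.takeWhile (· ≠ '#')
      :: (if '#' ∈ cs then mySplit ((cs.dropWhile (· ≠ '#')).tail) else []) := by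
  induction cs with
  | nil => simp [mySplit]
  | cons c rest ih =>
    by_cases hc : c = '#'
    · subst hc; simp [mySplit, List.takeWhile, List.dropWhile]
    · have hc' : ¬ ('#' = c) := fun h' => hc h'.symm
      simp only [mySplit, hc, if_false, ih]
      simp [List.takeWhile_cons, List.dropWhile_cons, hc, hc', List.modifyHead]

-- counters only feed the first segment
lemma Aflush_view (cs : List Char) (co cd : Nat) :
    Aflush cs co cd
      = List.replicate (co + (cs.takeWhile (· ≠ '#')).count 'O') 'O'
        ++ List.replicate (cd + (cs.takeWhile (· ≠ '#')).count '.') '.'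
        ++ (if '#' ∈ cs then '#' :: Aflush ((cs.dropWhile (· ≠ '#')).tail) 0 0 else []) := by
  induction cs generalizing co cd with
  | nil => simp [Aflush]
  | cons c rest ih =>
    by_cases h1 : c = '.'
    · subst h1
      simp only [Aflush, if_true, ih]
      simp [List.takeWhile_cons, List.dropWhile_cons, List.count_cons]
      omega
    · have h1' : ¬ ('.' = c) := fun h' => h1 h'.symm
      by_cases h2 : c = 'O'
      · subst h2
        simp only [Aflush, if_false, if_true, ih]
        simp [List.takeWhile_cons, List.dropWhile_cons, List.count_cons, h1']
        omega
      · have h2' : ¬ ('O' = c) := fun h' => h2 h'.symm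
        by_cases h3 : c = '#'
        · subst h3
          simp [Aflush, List.takeWhile_cons, List.dropWhile_cons]
        · simp only [Aflush, h1, h2, h3, if_false, ih]
          have h3' : ¬ ('#' = c) := fun h' => h3 h'.symm
          simp [List.takeWhile_cons, List.dropWhile_cons, h1, h1', h2, h2', h3, h3', List.count_cons]

-- B's pipeline on the list level
def Bfun (cs : List Char) : List Char :=
  PySem.Chars.join ['#'] ((PySem.Chars.splitOn cs ['#']).map rebuiltSeg)

lemma Bfun_view (cs : List Char) :
    Bfun cs = rebuiltSeg (cs.takeWhile (· ≠ '#'))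
      ++ (if '#' ∈ cs then '#' :: Bfun ((cs.dropWhile (· ≠ '#')).tail) else []) := by
  unfold Bfun
  rw [splitOn_eq_mySplit, mySplit_view cs]
  by_cases h : '#' ∈ cs
  · rw [if_pos h, if_pos h, splitOn_eq_mySplit]
    obtain ⟨a, l', hl⟩ : ∃ a l', mySplit ((cs.dropWhile (· ≠ '#')).tail) = a :: l' := by
      cases hms : mySplit ((cs.dropWhile (· ≠ '#')).tail) with
      | nil => exact absurd hms (mySplit_ne_nil _)
      | cons a l' => exact ⟨a, l', rfl⟩
    rw [hl, List.map_cons, List.map_cons, PySem.Chars.join_cons_cons]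
    simp
  · simp [h, PySem.Chars.join_singleton]

-- main list-level equality
lemma Aflush_eq_Bfun (cs : List Char) : Aflush cs 0 0 = Bfun cs := by
  induction hn : cs.length using Nat.strong_induction_on generalizing cs with
  | _ n ih =>
    rw [Aflush_view, Bfun_view]
    by_cases h : '#' ∈ cs
    · rw [if_pos h, if_pos h]
      have hlt : ((cs.dropWhile (· ≠ '#')).tail).length < n := by
        subst hn
        have h1 : (cs.dropWhile (· ≠ '#')).length ≤ cs.length := List.length_dropWhile_le _ _
        have h2 : cs.dropWhile (· ≠ '#') ≠ [] := by
          intro hnil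
          have hall := List.dropWhile_eq_nil_iff.mp hnil '#' h
          simp at hall
        cases hd : cs.dropWhile (· ≠ '#') with
        | nil => exact absurd hd h2
        | cons a l =>
          have := h1
          rw [hd] at this
          simp at this ⊢
          omega
      rw [ih _ hlt _ rfl]
      simp [rebuiltSeg, count_single]
    · simp [h, rebuiltSeg, count_single]

-- ===== VERDICT (by name: the statement is the Claim_ definition above) =====
theorem new_text_spec : Claim_equal_new_text := by
  intro text _
  unfold Spec_new_text new_text new_text_alt
  show String.ofList ((text.toList.foldl fstep (0, 0, [])).2.2
      ++ List.replicate (text.toList.foldl fstep (0, 0, [])).1 'O'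
      ++ List.replicate (text.toList.foldl fstep (0, 0, [])).2.1 '.')
    = String.ofList (Bfun text.toList)
  rw [foldA_spec text.toList 0 0 [], List.nil_append, Aflush_eq_Bfun]
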